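-- pv_equiv track=rewrite | github.com/foliant-docs/foliantcontrib.apilinks | foliant/preprocessors/apilinks.py | convert_to_anchor
-- ===== SOURCE A (Python) =====
-- def convert_to_anchor(reference):
--     '''
--     Convert reference string into correct anchor
--
--     >>> convert_to_anchor('GET /endpoint/method{id}')
--     'get-endpoint-method-id'
--     '''
--     result = ''
--     accum = False
--     header = reference.strip()
--     for char in header:
--         if char == '_' or char.isalpha():
--             if accum:
--                 accum = False
--                 result += f'-{char.lower()}'
--             else:
--                 result += char.lower()
--         else:
--             accum = True
--     return result
-- ===== SOURCE B (Python) =====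
-- def convert_to_anchor(reference):
--     '''Run-based rewrite: split the stripped string into maximal runs of
--     kept chars (letters and '_') vs separator chars, emit each kept run
--     lowercased and each separator run as a single '-', then drop a
--     trailing '-'.'''
--     header = reference.strip()
--     pieces = []
--     i, n = 0, len(header)
--     while i < n:
--         keep = header[i] == '_' or header[i].isalpha()
--         j = i
--         while j < n and (header[j] == '_' or header[j].isalpha()) == keep:
--             j += 1
--         pieces.append(header[i:j].lower() if keep else '-')
--         i = j
--     if pieces and pieces[-1] == '-':
--         pieces.pop()
--     return ''.join(pieces)
-- ===== Notes on version B (the rewrite author's own statement) =====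
-- stated objective: alternative
-- what changed: Replaces A's char-by-char state machine with a pending-dash flag by a run-based pass: split the stripped string into maximal kept/separator runs, map each run to a piece (lowercased run or a single '-'), drop a trailing '-' piece and join.
import Mathlib
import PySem

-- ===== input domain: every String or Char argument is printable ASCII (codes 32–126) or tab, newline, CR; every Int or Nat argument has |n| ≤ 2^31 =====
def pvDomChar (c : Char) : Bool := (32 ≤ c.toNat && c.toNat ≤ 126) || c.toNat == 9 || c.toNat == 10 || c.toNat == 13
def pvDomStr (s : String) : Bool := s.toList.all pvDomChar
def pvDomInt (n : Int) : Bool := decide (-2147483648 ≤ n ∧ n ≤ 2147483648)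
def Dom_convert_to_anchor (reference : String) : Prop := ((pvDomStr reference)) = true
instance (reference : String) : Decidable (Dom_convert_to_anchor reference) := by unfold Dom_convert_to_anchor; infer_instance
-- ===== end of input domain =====

-- B replaces A's char-by-char pending-dash state machine by a run-based pass
-- (maximal kept/separator runs mapped to pieces, trailing '-' piece dropped, joined);
-- same cost, alternative decomposition.


-- ===== PORT A =====
-- literal port of A: accumulate result chars with a pending-separator flag
def convert_to_anchor (reference : String) : String :=
  let header := PySem.Str.strip reference
  let st := header.toList.foldl
    (fun (st : List Char × Bool) char =>
      if char == '_' || PySem.Chars.isalpha char then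
        if st.2 then (st.1 ++ ['-', PySem.Chars.lowerChar char], false)
        else (st.1 ++ [PySem.Chars.lowerChar char], false)
      else (st.1, true))
    ([], false)
  String.ofList st.1

-- ===== PORT B =====
-- B-side helpers: the kept-character predicate and the run splitter
def pvKeep (c : Char) : Bool := c == '_' || PySem.Chars.isalpha c

-- maximal runs of same-keep-status chars, each mapped to its piece
def pvPieces : List Char → List (List Char)
  | [] => []
  | c :: cs =>
    let k := pvKeep c
    let piece := if k then (c :: cs.takeWhile (fun x => pvKeep x == k)).map PySem.Chars.lowerChar
                 else ['-']
    piece :: pvPieces (cs.dropWhile (fun x => pvKeep x == k))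
termination_by l => l.length
decreasing_by
  simp only [List.length_cons]
  exact Nat.lt_succ_of_le (List.length_dropWhile_le _ _)

-- drop a trailing '-' piece (Python: if pieces and pieces[-1] == '-': pieces.pop())
def pvDropT (ps : List (List Char)) : List (List Char) :=
  if ps.getLast? = some ['-'] then ps.dropLast else ps

def convert_to_anchor_alt (reference : String) : String :=
  let header := PySem.Str.strip reference
  String.ofList (pvDropT (pvPieces header.toList)).flatten

-- ===== PRECONDITION & SPEC =====
def Spec_convert_to_anchor (reference : String) (out : String) : Prop := out = convert_to_anchor_alt reference
instance (reference : String) (out : String) : Decidable (Spec_convert_to_anchor reference out) := by unfold Spec_convert_to_anchor; infer_instance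

-- ===== CLAIM (what is proved, stated in full; the proofs are below) =====
def Claim_equal_convert_to_anchor : Prop := ∀ (reference : String), Dom_convert_to_anchor reference → Spec_convert_to_anchor reference (convert_to_anchor reference)

-- ===== LEMMAS AND PROOFS =====

-- fused recursion computing A's loop result from the remaining chars and the accum flag
def pvFA : List Char → Bool → List Char
  | [], _ => []
  | c :: cs, a =>
    if pvKeep c then
      (if a then ['-', PySem.Chars.lowerChar c] else [PySem.Chars.lowerChar c]) ++ pvFA cs false
    else pvFA cs true

theorem pvFA_keep (c : Char) (cs : List Char) (a : Bool) (h : pvKeep c = true) :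
    pvFA (c :: cs) a =
      (if a then ['-', PySem.Chars.lowerChar c] else [PySem.Chars.lowerChar c]) ++ pvFA cs false := by
  rw [pvFA, if_pos h]

theorem pvFA_sep (c : Char) (cs : List Char) (a : Bool) (h : pvKeep c = false) :
    pvFA (c :: cs) a = pvFA cs true := by
  rw [pvFA, if_neg]
  simp [h]

-- A's loop step, named for the proofs (definitionally A's lambda)
def pvStep (st : List Char × Bool) (char : Char) : List Char × Bool :=
  if char == '_' || PySem.Chars.isalpha char then
    if st.2 then (st.1 ++ ['-', PySem.Chars.lowerChar char], false)
    else (st.1 ++ [PySem.Chars.lowerChar char], false)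
  else (st.1, true)

-- A's foldl, started on st, appends pvFA of the remaining chars
theorem pvFoldl (cs : List Char) (st : List Char × Bool) :
    (cs.foldl pvStep st).1 = st.1 ++ pvFA cs st.2 := by
  induction cs generalizing st with
  | nil => simp [pvFA]
  | cons c cs ih =>
    rw [List.foldl_cons, ih]
    cases hkc : pvKeep c with
    | true =>
      have hkc' : (c == '_' || PySem.Chars.isalpha c) = true := hkc
      cases hst : st.2 <;> simp [pvStep, pvFA, hkc', hkc, hst, List.append_assoc]
    | false =>
      have hkc' : (c == '_' || PySem.Chars.isalpha c) = false := hkc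
      simp [pvStep, pvFA, hkc', hkc]

-- kept characters never lowercase to '-'
theorem pvLowerNeDash (c : Char) (h : pvKeep c = true) : PySem.Chars.lowerChar c ≠ '-' := by
  simp only [pvKeep, PySem.Chars.isalpha, PySem.Chars.isupper, PySem.Chars.islower,
    Bool.or_eq_true, Bool.and_eq_true, decide_eq_true_eq, beq_iff_eq] at h
  simp only [PySem.Chars.lowerChar, PySem.Chars.isupper, Bool.and_eq_true, decide_eq_true_eq]
  have hdash : ('-' : Char).toNat = 45 := by decide
  have haux : ∀ (n : Nat) (hn : n.isValidChar), (Char.ofNatAux n hn).toNat = n := fun n hn => rfl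
  split_ifs with hu
  · rcases hu with ⟨h1, h2⟩
    have h1' : 65 ≤ c.toNat := h1
    have h2' : c.toNat ≤ 90 := h2
    intro he
    have hv : (Char.ofNat (c.toNat + 32)).toNat = 45 := by rw [he, hdash]
    rw [Char.ofNat, dif_pos (Or.inl (by omega : c.toNat + 32 < 0xd800)), haux] at hv
    omega
  · intro he
    have hc : c.toNat = 45 := by rw [he, hdash]
    rcases h with h | h | h
    · rw [h] at hc; simp at hc
    · exact hu ⟨h.1, h.2⟩
    · have h1' : 97 ≤ c.toNat := h.1
      omega

theorem pvPieces_ne_nil (c : Char) (cs : List Char) : pvPieces (c :: cs) ≠ [] := by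
  rw [pvPieces]; simp

theorem pvDropT_cons (q : List Char) (ps : List (List Char)) (h : ps ≠ []) :
    pvDropT (q :: ps) = q :: pvDropT ps := by
  match ps, h with
  | p :: ps', _ =>
    simp only [pvDropT, List.getLast?_cons_cons]
    split_ifs <;> simp [List.dropLast_cons_of_ne_nil]

def pvG (cs : List Char) : List Char := (pvDropT (pvPieces cs)).flatten

theorem pvG_keep (c : Char) (cs : List Char) (h : pvKeep c = true) :
    pvG (c :: cs) = PySem.Chars.lowerChar c :: pvG cs := by
  cases cs with
  | nil =>
    have hne := pvLowerNeDash c h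
    simp [pvG, pvPieces, pvDropT, h, hne]
  | cons d cs' =>
    cases hd : pvKeep d with
    | true =>
      have hA : pvPieces (c :: d :: cs') =
          (PySem.Chars.lowerChar c :: PySem.Chars.lowerChar d ::
            (cs'.takeWhile (fun x => pvKeep x == true)).map PySem.Chars.lowerChar) ::
          pvPieces (cs'.dropWhile (fun x => pvKeep x == true)) := by
        rw [pvPieces]
        simp [h, hd]
      have hB : pvPieces (d :: cs') =
          (PySem.Chars.lowerChar d ::
            (cs'.takeWhile (fun x => pvKeep x == true)).map PySem.Chars.lowerChar) ::
          pvPieces (cs'.dropWhile (fun x => pvKeep x == true)) := by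
        rw [pvPieces]
        simp [hd]
      rcases eq_or_ne (pvPieces (cs'.dropWhile (fun x => pvKeep x == true))) [] with hnil | hne
      · have hd' : PySem.Chars.lowerChar d ≠ '-' := pvLowerNeDash d hd
        have h1 : PySem.Chars.lowerChar c :: PySem.Chars.lowerChar d ::
            (cs'.takeWhile (fun x => pvKeep x == true)).map PySem.Chars.lowerChar ≠ ['-'] := by
          intro he
          injection he with _ he2
          exact List.cons_ne_nil _ _ he2
        have h2 : PySem.Chars.lowerChar d ::
            (cs'.takeWhile (fun x => pvKeep x == true)).map PySem.Chars.lowerChar ≠ ['-'] := by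
          intro he
          injection he with he1 _
          exact hd' he1
        rw [pvG, pvG, hA, hB, hnil]
        simp only [pvDropT, List.getLast?_singleton, Option.some.injEq]
        rw [if_neg h1, if_neg h2]
        simp
      · rw [pvG, pvG, hA, hB, pvDropT_cons _ _ hne, pvDropT_cons _ _ hne]
        simp
    | false =>
      have hA : pvPieces (c :: d :: cs') = [PySem.Chars.lowerChar c] :: pvPieces (d :: cs') := by
        rw [pvPieces]
        simp [h, hd]
      rw [pvG, hA, pvDropT_cons _ _ (pvPieces_ne_nil d cs')]
      simp [pvG]

theorem pvG_sep (c : Char) (cs : List Char) (h : pvKeep c = false) :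
    pvG (c :: cs) =
      if cs.any pvKeep then '-' :: pvG (cs.dropWhile (fun x => !pvKeep x)) else [] := by
  induction cs generalizing c with
  | nil => simp [pvG, pvPieces, pvDropT, h]
  | cons d cs' ih =>
    cases hd : pvKeep d with
    | true =>
      have hA : pvPieces (c :: d :: cs') = ['-'] :: pvPieces (d :: cs') := by
        rw [pvPieces]
        simp [h, hd]
      rw [pvG, hA, pvDropT_cons _ _ (pvPieces_ne_nil d cs')]
      simp [List.any_cons, hd, pvG]
    | false =>
      have hA : pvPieces (c :: d :: cs') = pvPieces (d :: cs') := by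
        rw [pvPieces, pvPieces]
        simp [h, hd]
      have hG : pvG (c :: d :: cs') = pvG (d :: cs') := by rw [pvG, pvG, hA]
      rw [hG, ih d hd]
      simp [List.any_cons, hd]

theorem pvMain (cs : List Char) :
    pvFA cs false = pvG cs ∧
      pvFA cs true =
        (if cs.any pvKeep then '-' :: pvG (cs.dropWhile (fun x => !pvKeep x)) else []) := by
  induction cs with
  | nil => simp [pvFA, pvG, pvPieces, pvDropT]
  | cons c cs ih =>
    cases hkc : pvKeep c with
    | true =>
      refine ⟨?_, ?_⟩
      · rw [pvFA_keep c cs false hkc, ih.1, pvG_keep c cs hkc]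
        simp
      · rw [pvFA_keep c cs true hkc, ih.1]
        simp [List.any_cons, hkc, pvG_keep c cs hkc]
    | false =>
      refine ⟨?_, ?_⟩
      · rw [pvFA_sep c cs false hkc, ih.2, pvG_sep c cs hkc]
      · rw [pvFA_sep c cs true hkc, ih.2]
        simp [List.any_cons, hkc]

-- ===== VERDICT (by name: the statement is the Claim_ definition above) =====
theorem convert_to_anchor_spec : Claim_equal_convert_to_anchor := by
  intro reference _
  show convert_to_anchor reference = convert_to_anchor_alt reference
  show String.ofList ((PySem.Str.strip reference).toList.foldl pvStep ([], false)).1 =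
    String.ofList (pvDropT (pvPieces (PySem.Str.strip reference).toList)).flatten
  rw [pvFoldl]
  rw [List.nil_append, (pvMain _).1]
  rfl
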